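-- pv_equiv track=rewrite | github.com/xurror/Solution_to_Daniel_Liang_python_exercises | chapter6/6.29.py | sumOfOddPlace
-- ===== SOURCE A (Python) =====
-- def getDigit(num):
--     if num>9:
--         num -= 9
--         return num
--     else:
--         return num
--
-- def sumOfOddPlace(num):
--     sum1=0
--     while num>0:
--         digit=num%10
--         digit=getDigit(digit)
--         sum1+=digit
--         num=num//100
--
--     return sum1
-- ===== SOURCE B (Python) =====
-- def sumOfOddPlace(num):
--     if num <= 0:
--         return 0
--     s = str(num)
--     return sum(int(c) for c in s[::-1][::2])
-- ===== Notes on version B (the rewrite author's own statement) =====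
-- stated objective: alternative
-- what changed: Replaces the arithmetic digit-peeling loop (modulus and floor division by powers of ten) with a string-based computation: build str(num), reverse it, take every second character by slicing, and sum the digit values.
import Mathlib
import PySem

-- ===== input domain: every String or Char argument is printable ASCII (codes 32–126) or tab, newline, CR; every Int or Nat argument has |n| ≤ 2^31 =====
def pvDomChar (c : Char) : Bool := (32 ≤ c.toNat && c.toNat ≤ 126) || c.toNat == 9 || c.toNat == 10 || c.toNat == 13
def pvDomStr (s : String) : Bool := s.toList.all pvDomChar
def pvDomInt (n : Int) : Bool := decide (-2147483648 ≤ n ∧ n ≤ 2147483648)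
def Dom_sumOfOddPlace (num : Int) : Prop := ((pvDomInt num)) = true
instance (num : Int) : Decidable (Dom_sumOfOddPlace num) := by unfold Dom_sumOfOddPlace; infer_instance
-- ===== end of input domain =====

-- B replaces A's arithmetic digit-peeling loop with a string computation: str(num) reversed,
-- sliced with step two, and the digit characters summed (objective: alternative decomposition).


-- ===== PORT A =====
def getDigit (num : Int) : Int :=
  if num > 9 then num - 9 else num

def sumOfOddPlaceLoop (num sum1 : Int) : Int :=
  if _h : num > 0 then
    sumOfOddPlaceLoop (PySem.Int.floordiv num 100) (sum1 + getDigit (PySem.Int.mod num 10))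
  else sum1
termination_by num.toNat
decreasing_by
  rw [PySem.Int.floordiv_eq_ediv_of_pos (by omega)]
  omega

def sumOfOddPlace (num : Int) : Int := sumOfOddPlaceLoop num 0

-- ===== PORT B =====
-- int(c) for a single character; the slice only yields decimal digit characters, so the
-- parse never fails and the `.getD 0` default is unreachable.
def charVal (c : Char) : Int := (PySem.Int.ofChars? [c]).getD 0

def sumOfOddPlace_alt (num : Int) : Int :=
  if num ≤ 0 then 0
  else
    match PySem.Str.slice? (PySem.Int.toStr num) none none (-1) with   -- s[::-1]
    | none => 0   -- unreachable: step ≠ 0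
    | some r =>
      match PySem.Str.slice? r none none 2 with                         -- …[::2]
      | none => 0   -- unreachable: step ≠ 0
      | some t => (t.toList.map charVal).sum

-- ===== PRECONDITION & SPEC =====
def Spec_sumOfOddPlace (num : Int) (out : Int) : Prop := out = sumOfOddPlace_alt num
instance (num : Int) (out : Int) : Decidable (Spec_sumOfOddPlace num out) := by unfold Spec_sumOfOddPlace; infer_instance

-- ===== CLAIM (what is proved, stated in full; the proofs are below) =====
def Claim_equal_sumOfOddPlace : Prop := ∀ (num : Int), Dom_sumOfOddPlace num → Spec_sumOfOddPlace num (sumOfOddPlace num)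

-- ===== LEMMAS AND PROOFS =====

/-- Every second element of a list, starting with the first: what `xs[::2]` selects. -/
def everyOther {α : Type} : List α → List α
  | [] => []
  | [a] => [a]
  | a :: _ :: t => a :: everyOther t

lemma filterMap_range_two {α : Type} (xs : List α) :
    (List.range ((xs.length + 1) / 2)).filterMap (fun k => xs[2 * k]?) = everyOther xs := by
  induction xs using everyOther.induct with
  | case1 => simp [everyOther]
  | case2 a => simp [everyOther, List.range_succ]
  | case3 a b t ih =>
    have hlen : ((a :: b :: t).length + 1) / 2 = (t.length + 1) / 2 + 1 := by
      simp; omega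
    rw [hlen, List.range_succ_eq_map, List.filterMap_cons, List.filterMap_map]
    simp only [Function.comp_def]
    have : ∀ k : ℕ, (a :: b :: t)[2 * (k + 1)]? = t[2 * k]? := by
      intro k
      have h2 : 2 * (k + 1) = 2 * k + 1 + 1 := by omega
      rw [h2]
      simp
    simp only [Nat.succ_eq_add_one, this]
    simp [everyOther, ih]

lemma slice?_step_two {α : Type} (xs : List α) :
    PySem.List.slice? xs none none 2 = some (everyOther xs) := by
  rw [← filterMap_range_two]
  simp only [PySem.List.slice?, PySem.List.sliceIndices]
  norm_num
  have hc : (if 0 < xs.length then (((xs.length : Int) + 2 - 1) / 2).toNat else 0)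
      = (xs.length + 1) / 2 := by
    split_ifs with h <;> omega
  rw [hc]
  apply List.filterMap_congr
  intro k _
  congr 1

lemma everyOther_map {α β : Type} (f : α → β) (xs : List α) :
    everyOther (xs.map f) = (everyOther xs).map f := by
  induction xs using everyOther.induct <;> simp [everyOther, *]

lemma mem_everyOther {α : Type} {x : α} {xs : List α} (h : x ∈ everyOther xs) : x ∈ xs := by
  induction xs using everyOther.induct with
  | case1 => simp [everyOther] at h
  | case2 a => simpa [everyOther] using h
  | case3 a b t ih =>
    simp only [everyOther, List.mem_cons] at h ⊢
    rcases h with h | h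
    · exact Or.inl h
    · exact Or.inr (Or.inr (ih h))

lemma charVal_digitChar (d : ℕ) (h : d < 10) : charVal (Nat.digitChar d) = (d : Int) := by
  interval_cases d <;> decide

lemma sum_map_charVal_digitChar (l : List ℕ) (h : ∀ d ∈ l, d < 10) :
    (List.map (charVal ∘ Nat.digitChar) l).sum = (l.sum : Int) := by
  induction l with
  | nil => rfl
  | cons a t ih =>
    have ha : a < 10 := h a List.mem_cons_self
    have ht : ∀ d ∈ t, d < 10 := fun d hd => h d (List.mem_cons_of_mem a hd)
    simp only [List.map_cons, Function.comp_apply, List.sum_cons, ih ht,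
      charVal_digitChar a ha]
    push_cast
    ring

lemma toDigitsCore_eq_digits :
    ∀ (f n : ℕ) (l : List Char), 0 < n → n ≤ f →
      Nat.toDigitsCore 10 f n l = ((Nat.digits 10 n).map Nat.digitChar).reverse ++ l := by
  intro f
  induction f with
  | zero => intro n l hn hf; omega
  | succ f ih =>
    intro n l hn hf
    rw [Nat.toDigitsCore]
    by_cases h10 : n / 10 = 0
    · have hlt : n < 10 := by omega
      rw [if_pos h10, Nat.digits_def' (by norm_num : 1 < 10) hn, h10]
      simp [Nat.mod_eq_of_lt hlt]
    · have hpos : 0 < n / 10 := Nat.pos_of_ne_zero h10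
      have hle : n / 10 ≤ f := by
        have := Nat.div_lt_self hn (by norm_num : 1 < 10)
        omega
      rw [if_neg h10, ih (n / 10) _ hpos hle,
        Nat.digits_def' (by norm_num : 1 < 10) hn]
      simp

lemma toDigits_eq_digits (n : ℕ) (h : 0 < n) :
    Nat.toDigits 10 n = ((Nat.digits 10 n).map Nat.digitChar).reverse := by
  rw [Nat.toDigits, toDigitsCore_eq_digits (n + 1) n [] h (by omega), List.append_nil]

/-- The digit sum `S n` that B computes: every other decimal digit of `n`, least significant first. -/
def oddPlaceSum (n : ℕ) : Int :=
  ((everyOther (Nat.digits 10 n)).sum : Int)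

lemma oddPlaceSum_step (n : ℕ) (hn : 0 < n) :
    oddPlaceSum n = (↑(n % 10) : Int) + oddPlaceSum (n / 100) := by
  rw [oddPlaceSum, Nat.digits_def' (by norm_num : 1 < 10) hn]
  by_cases h10 : n / 10 = 0
  · have h100 : n / 100 = 0 := by omega
    rw [h10, h100]
    simp [everyOther, oddPlaceSum]
  · rw [Nat.digits_def' (by norm_num : 1 < 10) (Nat.pos_of_ne_zero h10)]
    have : n / 10 / 10 = n / 100 := by omega
    rw [this]
    simp [everyOther, oddPlaceSum]

lemma loopA_eq : ∀ (n : ℕ) (acc : Int),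
    sumOfOddPlaceLoop (n : Int) acc = acc + oddPlaceSum n := by
  intro n
  induction n using Nat.strong_induction_on with
  | _ n ih =>
    intro acc
    rw [sumOfOddPlaceLoop]
    by_cases hn : 0 < n
    · rw [dif_pos (by exact_mod_cast hn)]
      have hd : PySem.Int.floordiv (n : Int) 100 = ((n / 100 : ℕ) : Int) := by
        exact_mod_cast PySem.Int.floordiv_natCast n 100
      have hm : PySem.Int.mod (n : Int) 10 = ((n % 10 : ℕ) : Int) := by
        exact_mod_cast PySem.Int.mod_natCast n 10
      have hg : getDigit ((n % 10 : ℕ) : Int) = ((n % 10 : ℕ) : Int) := by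
        rw [getDigit, if_neg]
        have : n % 10 < 10 := Nat.mod_lt _ (by norm_num)
        push_cast
        omega
      rw [hd, hm, hg, ih (n / 100) (Nat.div_lt_self hn (by norm_num)) _,
        oddPlaceSum_step n hn]
      ring
    · have h0 : n = 0 := by omega
      rw [dif_neg (by simp [h0]), h0]
      simp [oddPlaceSum, everyOther]

lemma alt_eq (n : ℕ) (hn : 0 < n) :
    sumOfOddPlace_alt (n : Int) = oddPlaceSum n := by
  rw [sumOfOddPlace_alt, if_neg (by exact_mod_cast Nat.not_le.mpr hn)]
  have hts : (PySem.Int.toStr (n : Int)).toList = ((Nat.digits 10 n).map Nat.digitChar).reverse := by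
    rw [PySem.Int.toStr, String.toList_ofList, PySem.Int.toChars,
      if_neg (by exact_mod_cast Int.not_lt.mpr (Int.natCast_nonneg n)), Int.toNat_natCast]
    exact toDigits_eq_digits n hn
  rw [PySem.Str.slice?_none_none_neg_one, hts, List.reverse_reverse]
  simp only [PySem.Str.slice?]
  rw [PySem.Chars.slice?_eq_listSlice?, String.toList_ofList, slice?_step_two, Option.map_some]
  show (List.map charVal
      (String.ofList (everyOther (List.map Nat.digitChar (Nat.digits 10 n)))).toList).sum
    = oddPlaceSum n
  rw [String.toList_ofList, everyOther_map, List.map_map,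
    sum_map_charVal_digitChar _ (fun d hd => Nat.digits_lt_base (by norm_num) (mem_everyOther hd)),
    oddPlaceSum]

-- ===== VERDICT (by name: the statement is the Claim_ definition above) =====
theorem sumOfOddPlace_spec : Claim_equal_sumOfOddPlace := by
  intro num _
  unfold Spec_sumOfOddPlace sumOfOddPlace
  by_cases h : num ≤ 0
  · rw [sumOfOddPlaceLoop, dif_neg (by omega), sumOfOddPlace_alt, if_pos h]
  · have hn : num = ((num.toNat : ℕ) : Int) := by omega
    rw [hn, loopA_eq, alt_eq num.toNat (by omega), zero_add]
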